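-- pv_equiv track=rewrite | github.com/Rudra2018/VulnHunter | azure_ml_retraining/azure_ml_pipeline.py | _check_cei_pattern
-- ===== SOURCE A (Python) =====
-- def _check_cei_pattern(content: str) -> bool:
--     """Check if contract follows Checks-Effects-Interactions pattern."""
--     # Simplified heuristic for CEI pattern
--     lines = content.split('\n')
--     for i, line in enumerate(lines):
--         if '.call(' in line or '.send(' in line or '.transfer(' in line:
--             # Check if there are state changes after external calls
--             remaining_lines = lines[i+1:i+10]  # Check next 10 lines
--             for remaining_line in remaining_lines:
--                 if ('=' in remaining_line and
--                     any(keyword in remaining_line for keyword in ['balance', 'amount', 'state'])):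
--                     return False  # State change after external call
--     return True
-- ===== SOURCE B (Python) =====
-- def _check_cei_pattern(content: str) -> bool:
--     """Single pass: a countdown window tracks 'within 9 lines after an external call'."""
--     window = 0
--     for line in content.split('\n'):
--         if window and '=' in line and any(k in line for k in ('balance', 'amount', 'state')):
--             return False
--         if '.call(' in line or '.send(' in line or '.transfer(' in line:
--             window = 9
--         else:
--             window = max(window - 1, 0)
--     return True
-- ===== Notes on version B (the rewrite author's own statement) =====
-- stated objective: alternative
-- what changed: Replaced the per-call re-scan of the next 9 lines (a nested loop over a slice) by a single pass that maintains a decaying window counter of lines-since-last-external-call, checking each line once.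
import Mathlib
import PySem

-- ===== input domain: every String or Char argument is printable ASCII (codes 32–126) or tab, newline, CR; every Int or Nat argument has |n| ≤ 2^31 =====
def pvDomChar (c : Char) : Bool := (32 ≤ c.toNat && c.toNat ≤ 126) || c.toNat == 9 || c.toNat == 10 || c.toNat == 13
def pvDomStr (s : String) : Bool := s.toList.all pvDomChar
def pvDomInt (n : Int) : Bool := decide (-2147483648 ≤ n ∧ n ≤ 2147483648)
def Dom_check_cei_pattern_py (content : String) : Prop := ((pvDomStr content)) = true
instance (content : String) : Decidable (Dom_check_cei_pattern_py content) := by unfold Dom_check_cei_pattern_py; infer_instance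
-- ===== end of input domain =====

-- B replaces A's nested window re-scan after each external-call line by a single pass
-- with a decaying window counter (objective: alternative decomposition, same results).


-- ===== PORT A =====
-- '.call(' in line or '.send(' in line or '.transfer(' in line
def pvIsCall (l : String) : Bool :=
  PySem.Str.isIn ".call(" l || PySem.Str.isIn ".send(" l || PySem.Str.isIn ".transfer(" l

-- '=' in line and any(keyword in line for keyword in ['balance', 'amount', 'state'])
def pvIsState (l : String) : Bool :=
  PySem.Str.isIn "=" l &&
    (PySem.Str.isIn "balance" l || PySem.Str.isIn "amount" l || PySem.Str.isIn "state" l)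

-- inner 'for remaining_line in remaining_lines: if …: return False' — true iff a state change is found
def pvCEIWindow (ws : List String) : Bool :=
  match ws with
  | [] => false
  | l :: tl => if pvIsState l then true else pvCEIWindow tl

-- outer 'for i, line in enumerate(lines)': rest is the remaining suffix, i its start index;
-- remaining_lines = lines[i+1:i+10] ported with PySem.List.slice on the full list.
def pvCEILoopA (lines : List String) (rest : List String) (i : Nat) : Bool :=
  match rest with
  | [] => true
  | l :: tl =>
    if pvIsCall l then
      if pvCEIWindow (PySem.List.slice lines (some ((i : Int) + 1)) (some ((i : Int) + 10))) then
        false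
      else pvCEILoopA lines tl (i + 1)
    else pvCEILoopA lines tl (i + 1)

-- content.split('\n'): sep ≠ "", so split? always returns some
def pvLines (content : String) : List String := (PySem.Str.split? content "\n").getD []

def check_cei_pattern_py (content : String) : Bool :=
  pvCEILoopA (pvLines content) (pvLines content) 0

-- ===== PORT B =====
-- single pass; window : Nat since Python's max(window-1, 0) keeps it nonnegative (Nat '-' is that max)
def pvCEILoopB (ls : List String) (window : Nat) : Bool :=
  match ls with
  | [] => true
  | l :: tl =>
    if window ≠ 0 && pvIsState l then false
    else pvCEILoopB tl (if pvIsCall l then 9 else window - 1)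

def check_cei_pattern_py_alt (content : String) : Bool :=
  pvCEILoopB (pvLines content) 0

-- ===== PRECONDITION & SPEC =====
def Spec_check_cei_pattern_py (content : String) (out : Bool) : Prop := out = check_cei_pattern_py_alt content
instance (content : String) (out : Bool) : Decidable (Spec_check_cei_pattern_py content out) := by unfold Spec_check_cei_pattern_py; infer_instance

-- ===== CLAIM (what is proved, stated in full; the proofs are below) =====
def Claim_equal_check_cei_pattern_py : Prop := ∀ (content : String), Dom_check_cei_pattern_py content → Spec_check_cei_pattern_py content (check_cei_pattern_py content)

-- ===== LEMMAS AND PROOFS =====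

-- shared characterisation: no state-change line sits ≤ 9 lines after a call line,
-- and (for B's invariant) none sits inside the leftover window w of an earlier call
def pvOK (ls : List String) (w : Nat) : Prop :=
  ∀ j, pvIsState (ls.getD j "") = true →
    w ≤ j ∧ ∀ i < j, pvIsCall (ls.getD i "") = true → i + 9 < j

theorem pvIsState_empty : pvIsState "" = false := by decide

theorem pvCEIWindow_eq_true_iff (ws : List String) :
    pvCEIWindow ws = true ↔ ∃ x ∈ ws, pvIsState x = true := by
  induction ws with
  | nil => simp [pvCEIWindow]
  | cons l tl ih =>
    by_cases h : pvIsState l = true <;> simp [pvCEIWindow, h, ih]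

theorem pvCEIWindow_take9 (tl : List String) :
    pvCEIWindow (tl.take 9) = true ↔ ∃ j, j < 9 ∧ pvIsState (tl.getD j "") = true := by
  rw [pvCEIWindow_eq_true_iff]
  constructor
  · rintro ⟨x, hx, hst⟩
    rcases List.mem_iff_getElem.1 hx with ⟨k, hk, hxk⟩
    have hk9 : k < 9 := lt_of_lt_of_le hk (by simp)
    have hklen : k < tl.length := by
      have := hk; simp [List.length_take] at this; omega
    refine ⟨k, hk9, ?_⟩
    rw [List.getD_eq_getElem _ _ hklen]
    rw [List.getElem_take] at hxk
    rw [hxk]; exact hst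
  · rintro ⟨j, hj9, hst⟩
    by_cases hlen : j < tl.length
    · refine ⟨tl[j], ?_, ?_⟩
      · have : j < (tl.take 9).length := by simp [List.length_take]; omega
        have : (tl.take 9)[j] ∈ tl.take 9 := List.getElem_mem this
        simpa [List.getElem_take] using this
      · rwa [List.getD_eq_getElem _ _ hlen] at hst
    · rw [List.getD_eq_default _ _ (by omega)] at hst
      rw [pvIsState_empty] at hst; cases hst

-- peel one line off the shared characterisation (w = 0 side, used for A)
theorem pvOK_cons_zero (l : String) (tl : List String) :
    pvOK (l :: tl) 0 ↔
      ((pvIsCall l = true → ∀ j, j < 9 → pvIsState (tl.getD j "") = false) ∧ pvOK tl 0) := by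
  constructor
  · intro h
    refine ⟨?_, ?_⟩
    · intro hc j hj9
      by_contra hst
      simp only [Bool.not_eq_false] at hst
      have := (h (j + 1) (by simpa using hst)).2 0 (by omega) (by simpa using hc)
      omega
    · intro j hst
      refine ⟨Nat.zero_le _, ?_⟩
      intro i hij hci
      have := (h (j + 1) (by simpa using hst)).2 (i + 1) (by omega) (by simpa using hci)
      omega
  · rintro ⟨hwin, htl⟩ j hst
    refine ⟨Nat.zero_le _, ?_⟩
    intro i hij hci
    cases j with
    | zero => omega
    | succ j' =>
      simp only [List.getD_cons_succ] at hst
      cases i with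
      | zero =>
        simp only [List.getD_cons_zero] at hci
        by_contra hlt
        have hj9 : j' < 9 := by omega
        have := hwin hci j' hj9
        rw [hst] at this; cases this
      | succ i' =>
        simp only [List.getD_cons_succ] at hci
        have := (htl j' hst).2 i' (by omega) hci
        omega

-- A's loop computes pvOK (of the remaining suffix)
theorem pvCEILoopA_iff (rest : List String) :
    ∀ (lines : List String) (i : Nat), lines.drop i = rest →
      (pvCEILoopA lines rest i = true ↔ pvOK rest 0) := by
  induction rest with
  | nil =>
    intro lines i _
    constructor
    · intro _ j hst
      simp only [List.getD_nil] at hst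
      rw [pvIsState_empty] at hst; cases hst
    · intro _; rfl
  | cons l tl ih =>
    intro lines i hdrop
    have hdrop1 : lines.drop (i + 1) = tl := by
      rw [← List.tail_drop, hdrop, List.tail_cons]
    have hslice : PySem.List.slice lines (some ((i : Int) + 1)) (some ((i : Int) + 10)) = tl.take 9 := by
      have h1 : ((i : Int) + 1) = ((i + 1 : Nat) : Int) := by push_cast; ring
      have h2 : ((i : Int) + 10) = ((i + 10 : Nat) : Int) := by push_cast; ring
      rw [h1, h2, PySem.List.slice_natCast, hdrop1]
      congr 1
      omega
    have hrec := ih lines (i + 1) hdrop1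
    rw [pvOK_cons_zero]
    by_cases hc : pvIsCall l = true
    · by_cases hw : pvCEIWindow (tl.take 9) = true
      · have hval : pvCEILoopA lines (l :: tl) i = false := by
          simp [pvCEILoopA, hc, hslice, hw]
        rw [hval]
        constructor
        · intro h; cases h
        · rintro ⟨hwin, _⟩
          rcases (pvCEIWindow_take9 tl).1 hw with ⟨j, hj9, hst⟩
          have := hwin hc j hj9
          rw [hst] at this; cases this
      · have hval : pvCEILoopA lines (l :: tl) i = pvCEILoopA lines tl (i + 1) := by
          simp [pvCEILoopA, hc, hslice, hw]
        rw [hval, hrec]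
        constructor
        · intro h
          refine ⟨?_, h⟩
          intro _ j hj9
          by_contra hst
          simp only [Bool.not_eq_false] at hst
          exact hw ((pvCEIWindow_take9 tl).2 ⟨j, hj9, hst⟩)
        · rintro ⟨_, h⟩; exact h
    · have hval : pvCEILoopA lines (l :: tl) i = pvCEILoopA lines tl (i + 1) := by
        simp [pvCEILoopA, hc]
      rw [hval, hrec]
      constructor
      · intro h
        exact ⟨fun hcl => absurd hcl hc, h⟩
      · rintro ⟨_, h⟩; exact h

-- B's loop computes pvOK (any window ≤ 9)
theorem pvCEILoopB_iff (ls : List String) :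
    ∀ w, w ≤ 9 → (pvCEILoopB ls w = true ↔ pvOK ls w) := by
  induction ls with
  | nil =>
    intro w _
    constructor
    · intro _ j hst
      simp only [List.getD_nil] at hst
      rw [pvIsState_empty] at hst; cases hst
    · intro _; rfl
  | cons l tl ih =>
    intro w hw9
    by_cases hbad : (w ≠ 0 && pvIsState l) = true
    · have hval : pvCEILoopB (l :: tl) w = false := by
        simp only [pvCEILoopB, hbad, if_true]
      rw [hval]
      rw [Bool.and_eq_true] at hbad
      obtain ⟨hwne, hst⟩ := hbad
      constructor
      · intro h; cases h
      · intro h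
        have := (h 0 (by simpa using hst)).1
        simp only [decide_eq_true_eq] at hwne
        omega
    · have hnot : ¬ (w ≠ 0 ∧ pvIsState l = true) := by
        intro ⟨h1, h2⟩
        apply hbad
        simp [h1, h2]
      have hw' : (if pvIsCall l then 9 else w - 1) ≤ 9 := by
        split <;> omega
      have hval : pvCEILoopB (l :: tl) w = pvCEILoopB tl (if pvIsCall l then 9 else w - 1) := by
        simp only [pvCEILoopB, hbad, Bool.false_eq_true, reduceIte]
      rw [hval, ih _ hw']
      constructor
      · intro h j hst
        cases j with
        | zero =>
          simp only [List.getD_cons_zero] at hst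
          have hw0 : w = 0 := by
            by_contra hne
            exact hnot ⟨hne, hst⟩
          exact ⟨by omega, by omega⟩
        | succ j' =>
          simp only [List.getD_cons_succ] at hst
          obtain ⟨hwle, hinner⟩ := h j' hst
          constructor
          · by_cases hc : pvIsCall l = true
            · rw [if_pos hc] at hwle; omega
            · rw [if_neg hc] at hwle; omega
          · intro i hij hci
            cases i with
            | zero =>
              simp only [List.getD_cons_zero] at hci
              rw [if_pos hci] at hwle; omega
            | succ i' =>
              simp only [List.getD_cons_succ] at hci
              have := hinner i' (by omega) hci
              omega
      · intro h j' hst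
        obtain ⟨hwle, hinner⟩ := h (j' + 1) (by simpa using hst)
        constructor
        · by_cases hc : pvIsCall l = true
          · rw [if_pos hc]
            have := hinner 0 (by omega) (by simpa using hc)
            omega
          · rw [if_neg hc]; omega
        · intro i' hij hci
          have := hinner (i' + 1) (by omega) (by simpa using hci)
          omega

-- ===== VERDICT (by name: the statement is the Claim_ definition above) =====
theorem check_cei_pattern_py_spec : Claim_equal_check_cei_pattern_py := by
  intro content _
  unfold Spec_check_cei_pattern_py check_cei_pattern_py check_cei_pattern_py_alt
  set ls := pvLines content with hls
  have hA := pvCEILoopA_iff ls ls 0 (by simp)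
  have hB := pvCEILoopB_iff ls 0 (by omega)
  cases h1 : pvCEILoopA ls ls 0 <;> cases h2 : pvCEILoopB ls 0
  · rfl
  · exact absurd (hA.2 (hB.1 h2)) (by simp [h1])
  · exact absurd (hB.2 (hA.1 h1)) (by simp [h2])
  · rfl
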